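-- pv_equiv track=rewrite | github.com/mnemonicsloth/genomics_local | construct_synteny_get_rdist_for_genes.py | assemble_by_chromosome
-- ===== SOURCE A (Python) =====
-- def assemble_by_chromosome(gene_list):
--     chromosome_dict = {}
--     for gene_id, (chromosome_id, start, end) in gene_list:
--         if chromosome_id not in chromosome_dict:
--             chromosome_dict[chromosome_id] = []
--         chromosome_dict[chromosome_id].append(  (gene_id, (start, end))  )
--     for chr_id, chr_gene_list in chromosome_dict.items():
--         chromosome_dict[chr_id] = sorted(chr_gene_list, key=lambda x: x[1])
--     return chromosome_dict
-- ===== SOURCE B (Python) =====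
-- def assemble_by_chromosome(gene_list):
--     chromosome_dict = {}
--     for _, (chromosome_id, _, _) in gene_list:
--         chromosome_dict.setdefault(chromosome_id, [])
--     for gene_id, (chromosome_id, start, end) in sorted(gene_list, key=lambda g: (g[1][1], g[1][2])):
--         chromosome_dict[chromosome_id].append((gene_id, (start, end)))
--     return chromosome_dict
-- ===== Notes on version B (the rewrite author's own statement) =====
-- stated objective: alternative
-- what changed: Instead of grouping genes per chromosome and then sorting each group separately, B sorts a copy of the whole gene list once by (start, end) (Python's stable sort) and then fills the groups in a single grouping pass, with key order fixed by a first-appearance pass over the original list.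
import Mathlib
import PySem

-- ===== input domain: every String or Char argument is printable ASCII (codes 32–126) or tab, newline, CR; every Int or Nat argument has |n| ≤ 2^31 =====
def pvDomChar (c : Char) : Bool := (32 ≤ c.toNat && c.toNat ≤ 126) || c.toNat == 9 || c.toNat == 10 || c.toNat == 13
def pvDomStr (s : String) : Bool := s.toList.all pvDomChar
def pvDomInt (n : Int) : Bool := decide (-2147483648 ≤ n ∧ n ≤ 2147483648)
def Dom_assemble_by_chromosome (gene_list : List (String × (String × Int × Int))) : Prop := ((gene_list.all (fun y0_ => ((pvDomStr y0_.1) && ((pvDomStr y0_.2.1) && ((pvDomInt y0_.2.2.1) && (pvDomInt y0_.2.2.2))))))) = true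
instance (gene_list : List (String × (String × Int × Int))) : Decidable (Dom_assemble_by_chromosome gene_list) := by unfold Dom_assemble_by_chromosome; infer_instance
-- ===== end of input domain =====

-- B replaces A's group-then-sort-each-group by one global stable sort by (start, end) followed by a single
-- grouping pass (keys pre-created in first-appearance order); same return value, alternative decomposition.

-- ===== PORT A =====
-- first loop: if chromosome_id not in dict insert [], then append (gene_id,(start,end));
-- second loop: replace each value by sorted(value, key=lambda x: x[1]) (tuple key → sorted2)
def assemble_by_chromosome (gene_list : List (String × (String × Int × Int))) : List (String × List (String × (Int × Int))) :=
  let d := gene_list.foldl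
    (fun d g =>
      (if d.contains g.2.1 then d else d.insert g.2.1 ([] : List (String × (Int × Int)))).modify
        g.2.1 [] (fun l => l ++ [(g.1, g.2.2)]))
    PySem.Dict.empty
  let d2 := d.items.foldl
    (fun d' p => d'.insert p.1 (PySem.List.sorted2 p.2 (fun x => x.2.1) (fun x => x.2.2) false)) d
  d2.items

-- ===== PORT B =====
-- first pass: create each chromosome's empty list on first sight (setdefault);
-- second pass: one grouping pass over the globally sorted copy (key (start, end) → sorted2)
def assemble_by_chromosome_alt (gene_list : List (String × (String × Int × Int))) : List (String × List (String × (Int × Int))) :=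
  let d := gene_list.foldl
    (fun d g => d.setdefault g.2.1 ([] : List (String × (Int × Int)))) PySem.Dict.empty
  let d2 := (PySem.List.sorted2 gene_list (fun g => g.2.2.1) (fun g => g.2.2.2) false).foldl
    (fun d g => d.modify g.2.1 [] (fun l => l ++ [(g.1, g.2.2)])) d
  d2.items

-- ===== PRECONDITION & SPEC =====
def Spec_assemble_by_chromosome (gene_list : List (String × (String × Int × Int))) (out : List (String × List (String × (Int × Int)))) : Prop := out = assemble_by_chromosome_alt gene_list
instance (gene_list : List (String × (String × Int × Int))) (out : List (String × List (String × (Int × Int)))) : Decidable (Spec_assemble_by_chromosome gene_list out) := by unfold Spec_assemble_by_chromosome; infer_instance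

-- ===== CLAIM (what is proved, stated in full; the proofs are below) =====
def Claim_equal_assemble_by_chromosome : Prop := ∀ (gene_list : List (String × (String × Int × Int))), Dom_assemble_by_chromosome gene_list → Spec_assemble_by_chromosome gene_list (assemble_by_chromosome gene_list)

-- ===== LEMMAS AND PROOFS =====

-- the lexicographic before-test of sorted2 IS the strict order on toLex (k1 x, k2 x)
theorem pv_before2_eq {α κ₁ κ₂ : Type} [LinearOrder κ₁] [LinearOrder κ₂]
    (k1 : α → κ₁) (k2 : α → κ₂) (a b : α) :
    (decide (k1 a < k1 b) || (!decide (k1 b < k1 a) && decide (k2 a < k2 b)))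
      = decide (toLex (k1 a, k2 a) < toLex (k1 b, k2 b)) := by
  by_cases h1 : k1 a < k1 b
  · by_cases h2 : k1 b < k1 a
    · exact absurd h2 (lt_asymm h1)
    · simp [Prod.Lex.toLex_lt_toLex, h1]
  · by_cases h2 : k1 b < k1 a
    · simp [Prod.Lex.toLex_lt_toLex, h1, h2, ne_of_gt h2]
    · simp [Prod.Lex.toLex_lt_toLex, le_antisymm (not_lt.1 h2) (not_lt.1 h1)]

theorem pv_sorted2_eq_sorted {α κ₁ κ₂ : Type} [LinearOrder κ₁] [LinearOrder κ₂]
    (xs : List α) (k1 : α → κ₁) (k2 : α → κ₂) :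
    PySem.List.sorted2 xs k1 k2 false = PySem.List.sorted xs (fun x => toLex (k1 x, k2 x)) false := by
  have h : (fun a b => decide (k1 a < k1 b) || (!decide (k1 b < k1 a) && decide (k2 a < k2 b)))
      = fun a b => decide (toLex (k1 a, k2 a) < toLex (k1 b, k2 b)) := by
    funext a b; exact pv_before2_eq k1 k2 a b
  simp only [PySem.List.sorted2, PySem.List.sorted, Bool.false_eq_true, if_false, h]

theorem pv_map_insertBy {α β : Type} (f : α → β) (bef : α → α → Bool) (bef' : β → β → Bool)
    (h : ∀ a b, bef' (f a) (f b) = bef a b) (x : α) (ys : List α) :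
    (PySem.List.insertBy bef x ys).map f = PySem.List.insertBy bef' (f x) (ys.map f) := by
  induction ys with
  | nil => simp [PySem.List.insertBy]
  | cons y ys ih =>
    simp only [PySem.List.insertBy, List.map_cons]
    by_cases hb : bef x y
    · simp [hb, h x y]
    · simp [hb, h x y, ih]

theorem pv_insertBy_front {α : Type} (bef : α → α → Bool) (x : α) (zs : List α)
    (h : ∀ z ∈ zs, bef x z = true) :
    PySem.List.insertBy bef x zs = x :: zs := by
  cases zs with
  | nil => rfl
  | cons z zs => simp [PySem.List.insertBy, h z (by simp)]

theorem pv_filter_insertBy {α κ : Type} [LinearOrder κ] (key : α → κ) (p : α → Bool) (x : α)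
    (ys : List α) (hys : ys.Pairwise (fun a b => key a ≤ key b)) :
    (PySem.List.insertBy (fun a b => decide (key a < key b)) x ys).filter p
      = if p x then PySem.List.insertBy (fun a b => decide (key a < key b)) x (ys.filter p)
        else ys.filter p := by
  induction ys with
  | nil =>
    by_cases hp : p x <;> simp [PySem.List.insertBy, hp]
  | cons y ys ih =>
    rcases List.pairwise_cons.1 hys with ⟨hy, hys'⟩
    by_cases hb : key x < key y
    · have hfront : PySem.List.insertBy (fun a b => decide (key a < key b)) x ((y :: ys).filter p)
          = x :: (y :: ys).filter p := by
        refine pv_insertBy_front _ _ _ (fun z hz => ?_)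
        have hzmem := List.mem_of_mem_filter hz
        have : key x < key z := by
          rcases List.mem_cons.1 hzmem with h | h
          · exact h ▸ hb
          · exact lt_of_lt_of_le hb (hy z h)
        simpa using this
      have hone : PySem.List.insertBy (fun a b => decide (key a < key b)) x (y :: ys)
          = x :: y :: ys := by simp [PySem.List.insertBy, hb]
      rw [hone, hfront, List.filter_cons]
    · have step : PySem.List.insertBy (fun a b => decide (key a < key b)) x (y :: ys)
          = y :: PySem.List.insertBy (fun a b => decide (key a < key b)) x ys := by
        simp [PySem.List.insertBy, hb]
      rw [step]
      by_cases hpy : p y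
      · by_cases hpx : p x
        · have h2 : PySem.List.insertBy (fun a b => decide (key a < key b)) x (y :: List.filter p ys)
              = y :: PySem.List.insertBy (fun a b => decide (key a < key b)) x (List.filter p ys) := by
            simp [PySem.List.insertBy, hb]
          simp [hpy, hpx, ih hys', h2]
        · simp [hpy, hpx, ih hys']
      · by_cases hpx : p x <;> simp [hpy, hpx, ih hys']

theorem pv_filter_foldl_insertBy {α κ : Type} [LinearOrder κ] (key : α → κ) (p : α → Bool) :
    ∀ (l acc : List α), acc.Pairwise (fun a b => key a ≤ key b) →
    ((l.foldl (fun a x => PySem.List.insertBy (fun a b => decide (key a < key b)) x a) acc).filter p)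
      = (l.filter p).foldl (fun a x => PySem.List.insertBy (fun a b => decide (key a < key b)) x a)
          (acc.filter p) := by
  intro l
  induction l with
  | nil => intro acc _; simp
  | cons x l ih =>
    intro acc hacc
    have hacc' := PySem.List.insertBy_pairwise_le key x acc hacc
    by_cases hp : p x <;>
      simp [hp, ih _ hacc', pv_filter_insertBy key p x acc hacc]

theorem pv_map_foldl_insertBy {α β : Type} (f : α → β) (bef : α → α → Bool) (bef' : β → β → Bool)
    (h : ∀ a b, bef' (f a) (f b) = bef a b) :
    ∀ (l acc : List α),
    ((l.foldl (fun a x => PySem.List.insertBy bef x a) acc).map f)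
      = (l.map f).foldl (fun a x => PySem.List.insertBy bef' x a) (acc.map f) := by
  intro l
  induction l with
  | nil => intro acc; simp
  | cons x l ih =>
    intro acc
    simp [List.foldl_cons, ih, pv_map_insertBy f bef bef' h]

-- a stable sort commutes with filter
theorem pv_filter_sorted {α κ : Type} [LinearOrder κ] (key : α → κ) (p : α → Bool) (xs : List α) :
    (PySem.List.sorted xs key false).filter p = PySem.List.sorted (xs.filter p) key false := by
  rw [PySem.List.sorted_eq_foldl_insertBy, PySem.List.sorted_eq_foldl_insertBy]
  simpa using pv_filter_foldl_insertBy key p xs [] List.Pairwise.nil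

-- mapping a key-preserving function commutes with the sort
theorem pv_map_sorted {α β κ : Type} [LinearOrder κ] (f : α → β) (key : α → κ) (key' : β → κ)
    (h : ∀ x, key' (f x) = key x) (xs : List α) :
    (PySem.List.sorted xs key false).map f = PySem.List.sorted (xs.map f) key' false := by
  rw [PySem.List.sorted_eq_foldl_insertBy, PySem.List.sorted_eq_foldl_insertBy]
  simpa using pv_map_foldl_insertBy f (fun a b => decide (key a < key b))
    (fun a b => decide (key' a < key' b)) (fun a b => by simp only [h]) xs []

-- the crux: sorting each group separately equals filtering the globally (stably) sorted list
theorem pv_crux (l : List (String × (String × Int × Int))) (c : String) :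
    PySem.List.sorted2 ((l.filter (fun g => g.2.1 == c)).map (fun g => (g.1, g.2.2)))
        (fun x => x.2.1) (fun x => x.2.2) false
      = ((PySem.List.sorted2 l (fun g => g.2.2.1) (fun g => g.2.2.2) false).filter
          (fun g => g.2.1 == c)).map (fun g => (g.1, g.2.2)) := by
  rw [pv_sorted2_eq_sorted, pv_sorted2_eq_sorted, pv_filter_sorted]
  exact (pv_map_sorted (fun g => (g.1, g.2.2)) (fun g => toLex (g.2.2.1, g.2.2.2))
    (fun x => toLex (x.2.1, x.2.2)) (fun x => rfl) (List.filter (fun g => g.2.1 == c) l)).symm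

-- A's first-loop step (insert-[]-if-missing then append) IS a modify with default []
theorem pv_stepA (d : PySem.Dict String (List (String × (Int × Int)))) (k : String)
    (x : String × (Int × Int)) :
    ((if d.contains k then d else d.insert k []).modify k [] (fun l => l ++ [x]))
      = d.modify k [] (fun l => l ++ [x]) := by
  by_cases h : d.contains k
  · simp [h]
  · simp only [h, Bool.false_eq_true, if_false, PySem.Dict.modify,
      PySem.Dict.getD_insert_self, PySem.Dict.insert_insert_self,
      PySem.Dict.getD_of_not_contains d _ (by simpa using h)]

-- folding insert over the dict's OWN items rewrites each value in place
theorem pv_foldl_insert_own {κ ν : Type} [BEq κ] [LawfulBEq κ] (f : κ × ν → ν) :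
    ∀ (todo pre : List (κ × ν)), ((pre ++ todo).map Prod.fst).Nodup →
    (todo.foldl (fun d p => d.insert p.1 (f p)) (PySem.Dict.mk (pre ++ todo))).items
      = pre ++ todo.map (fun p => (p.1, f p)) := by
  intro todo
  induction todo with
  | nil => intro pre _; simp
  | cons p rest ih =>
    intro pre hnod
    have hc : (PySem.Dict.mk (pre ++ p :: rest)).contains p.1 = true := by
      rw [PySem.Dict.contains_mk, List.any_eq_true]
      exact ⟨p, by simp, by simp⟩
    have hnod2 := hnod
    rw [List.map_append, List.nodup_append] at hnod2
    have hx : ∀ q ∈ pre, q.1 ≠ p.1 := by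
      intro q hq h
      exact hnod2.2.2 q.1 (List.mem_map_of_mem hq) p.1 (by simp) h
    have hy : ∀ q ∈ rest, q.1 ≠ p.1 := by
      intro q hq h
      have h2 := hnod2.2.1
      rw [List.map_cons, List.nodup_cons] at h2
      have : q.1 ∈ rest.map Prod.fst := List.mem_map_of_mem hq
      rw [h] at this
      exact h2.1 this
    have hins : ((PySem.Dict.mk (pre ++ p :: rest)).insert p.1 (f p))
        = PySem.Dict.mk ((pre ++ [(p.1, f p)]) ++ rest) := by
      apply PySem.Dict.ext
      rw [PySem.Dict.items_insert_of_contains _ _ hc, List.map_append, List.map_cons]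
      have hpre : List.map (fun q => if (q.1 == p.1) = true then (p.1, f p) else q) pre = pre := by
        rw [List.map_congr_left (fun q hq => if_neg (by simp [hx q hq]))]
        exact List.map_id _
      have hrest : List.map (fun q => if (q.1 == p.1) = true then (p.1, f p) else q) rest = rest := by
        rw [List.map_congr_left (fun q hq => if_neg (by simp [hy q hq]))]
        exact List.map_id _
      simp [hpre, hrest]
    have hnod' : (((pre ++ [(p.1, f p)]) ++ rest).map Prod.fst).Nodup := by
      simpa using hnod
    calc (List.foldl (fun d p => d.insert p.1 (f p)) (PySem.Dict.mk (pre ++ p :: rest)) (p :: rest)).items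
        = (List.foldl (fun d p => d.insert p.1 (f p))
            (PySem.Dict.mk ((pre ++ [(p.1, f p)]) ++ rest)) rest).items := by
          rw [List.foldl_cons, hins]
      _ = (pre ++ [(p.1, f p)]) ++ rest.map (fun p => (p.1, f p)) := ih _ hnod'
      _ = pre ++ (p :: rest).map (fun p => (p.1, f p)) := by simp

-- keys of the setdefault loop: first-appearance order, same as a modify loop
theorem pv_keys_setdefault_fold {β ν : Type} (key : β → String) (v : ν) :
    ∀ (l : List β) (d : PySem.Dict String ν),
    (l.foldl (fun d x => d.setdefault (key x) v) d).keys = PySem.Set.update d.keys (l.map key) := by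
  intro l
  induction l with
  | nil => intro d; simp [PySem.Set.update]
  | cons x l ih =>
    intro d
    rw [List.foldl_cons, ih]
    have : (d.setdefault (key x) v).keys = PySem.Set.add d.keys (key x) := by
      rw [PySem.Dict.keys_setdefault, PySem.Set.add]
      have : PySem.Set.contains d.keys (key x) = d.contains (key x) := by
        simp [PySem.Set.contains, PySem.Dict.contains_eq_decide_mem_keys]
      rw [this]
    rw [this]
    simp [PySem.Set.update, List.map_cons, List.foldl_cons]

-- every value produced by the setdefault loop is []
theorem pv_getD_setdefault_fold {β : Type} (key : β → String) :
    ∀ (l : List β) (d : PySem.Dict String (List (String × (Int × Int)))),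
    (∀ c, d.getD c [] = []) →
    ∀ c, (l.foldl (fun d x => d.setdefault (key x) []) d).getD c [] = [] := by
  intro l
  induction l with
  | nil => intro d h c; exact h c
  | cons x l ih =>
    intro d h c
    refine ih _ (fun c => ?_) c
    by_cases hc : c = key x
    · subst hc; rw [PySem.Dict.getD_setdefault_self]; exact h _
    · rw [PySem.Dict.getD_eq_get?_getD, PySem.Dict.get?_setdefault_of_ne _ _ hc,
        ← PySem.Dict.getD_eq_get?_getD]
      exact h c

theorem pv_update_of_subset (s : PySem.Set String) (xs : List String)
    (h : ∀ y ∈ xs, y ∈ s) : PySem.Set.update s xs = s := by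
  rw [PySem.Set.update_eq_append_filter]
  have : List.filter (fun y => !PySem.Set.contains s y) (PySem.Set.ofList xs) = [] := by
    rw [List.filter_eq_nil_iff]
    intro y hy
    have : y ∈ s := h y ((PySem.Set.mem_ofList xs y).1 hy)
    simp [PySem.Set.contains, this]
  rw [this, List.append_nil]

-- ===== VERDICT (by name: the statement is the Claim_ definition above) =====
theorem assemble_by_chromosome_spec : Claim_equal_assemble_by_chromosome := by
  intro gene_list _
  unfold Spec_assemble_by_chromosome assemble_by_chromosome assemble_by_chromosome_alt
  -- A's first loop = plain modify loop
  have hstep : (fun (d : PySem.Dict String (List (String × (Int × Int)))) (g : String × (String × Int × Int)) =>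
      (if d.contains g.2.1 then d else d.insert g.2.1 []).modify g.2.1 [] (fun l => l ++ [(g.1, g.2.2)]))
      = fun d g => d.modify g.2.1 [] (fun l => l ++ [(g.1, g.2.2)]) :=
    funext fun d => funext fun g => pv_stepA d g.2.1 (g.1, g.2.2)
  rw [hstep]
  set S := PySem.List.sorted2 gene_list (fun g => g.2.2.1) (fun g => g.2.2.2) false with hS
  -- characterise the grouping folds via the mapped-pair form
  have hgroup : ∀ (l : List (String × (String × Int × Int)))
      (d : PySem.Dict String (List (String × (Int × Int)))) (c : String),
      (l.foldl (fun d g => d.modify g.2.1 [] (fun v => v ++ [(g.1, g.2.2)])) d).getD c []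
        = d.getD c [] ++ (l.filter (fun g => g.2.1 == c)).map (fun g => (g.1, g.2.2)) := by
    intro l d c
    have hm : (l.foldl (fun d g => d.modify g.2.1 [] (fun v => v ++ [(g.1, g.2.2)])) d)
        = ((l.map (fun g => (g.2.1, (g.1, g.2.2)))).foldl
            (fun d p => d.modify p.1 [] (fun v => v ++ [p.2])) d) := by
      rw [List.foldl_map]
    rw [hm, PySem.Dict.getD_foldl_modify_append]
    congr 1
    rw [List.filter_map]
    simp [Function.comp_def]
  have hkeysmod : ∀ (l : List (String × (String × Int × Int)))
      (d : PySem.Dict String (List (String × (Int × Int)))),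
      (l.foldl (fun d g => d.modify g.2.1 [] (fun v => v ++ [(g.1, g.2.2)])) d).keys
        = PySem.Set.update d.keys (l.map (fun g => g.2.1)) := by
    intro l d
    exact PySem.Dict.keys_foldl_modify_key l (fun g => g.2.1) []
      (fun _ g => fun v => v ++ [(g.1, g.2.2)]) d
  set dA := gene_list.foldl
      (fun d g => d.modify g.2.1 [] (fun l => l ++ [(g.1, g.2.2)])) PySem.Dict.empty with hdA
  have hkeysA : dA.keys = PySem.Set.update [] (gene_list.map (fun g => g.2.1)) := by
    rw [hdA, hkeysmod, PySem.Dict.keys_empty]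
  have hnodA : dA.keys.Nodup := by
    rw [hkeysA]
    have : PySem.Set.update ([] : PySem.Set String) (gene_list.map (fun g => g.2.1))
        = PySem.Set.ofList (gene_list.map (fun g => g.2.1)) := rfl
    rw [this]; exact PySem.Set.nodup_ofList _
  have hgdA : ∀ c, dA.getD c []
      = (gene_list.filter (fun g => g.2.1 == c)).map (fun g => (g.1, g.2.2)) := by
    intro c; rw [hdA, hgroup, PySem.Dict.getD_empty, List.nil_append]
  -- A's second loop rewrites each value of dA in place
  have hAitems : (dA.items.foldl
      (fun d' p => d'.insert p.1 (PySem.List.sorted2 p.2 (fun x => x.2.1) (fun x => x.2.2) false)) dA).items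
      = dA.items.map (fun p => (p.1, PySem.List.sorted2 p.2 (fun x => x.2.1) (fun x => x.2.2) false)) := by
    have hmk : PySem.Dict.mk (([] : List (String × List (String × (Int × Int)))) ++ dA.items) = dA := by
      apply PySem.Dict.ext; simp
    have := pv_foldl_insert_own
      (fun p => PySem.List.sorted2 p.2 (fun x => x.2.1) (fun x => x.2.2) false)
      dA.items [] (by simpa [PySem.Dict.keys] using hnodA)
    rw [hmk] at this
    simpa using this
  -- B's dict
  set d0 := gene_list.foldl
      (fun d g => d.setdefault g.2.1 ([] : List (String × (Int × Int)))) PySem.Dict.empty with hd0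
  have hkeys0 : d0.keys = dA.keys := by
    rw [hkeysA]
    have h1 := pv_keys_setdefault_fold (fun g : String × (String × Int × Int) => g.2.1)
      ([] : List (String × (Int × Int))) gene_list PySem.Dict.empty
    rw [PySem.Dict.keys_empty] at h1
    exact h1
  have hgd0 : ∀ c, d0.getD c [] = [] := by
    intro c
    exact pv_getD_setdefault_fold (fun g => g.2.1) gene_list PySem.Dict.empty
      (fun c => PySem.Dict.getD_empty c []) c
  set dB := S.foldl (fun d g => d.modify g.2.1 [] (fun l => l ++ [(g.1, g.2.2)])) d0 with hdB
  have hkeysB : dB.keys = dA.keys := by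
    rw [hdB, hkeysmod, hkeys0]
    refine pv_update_of_subset _ _ (fun y hy => ?_)
    rcases List.mem_map.1 hy with ⟨g, hg, rfl⟩
    have hgl : g ∈ gene_list := (PySem.List.sorted2_perm gene_list _ _ false).mem_iff.1 (hS ▸ hg)
    rw [hkeysA]
    have : PySem.Set.update ([] : PySem.Set String) (gene_list.map (fun g => g.2.1))
        = PySem.Set.ofList (gene_list.map (fun g => g.2.1)) := rfl
    rw [this, PySem.Set.mem_ofList]
    exact List.mem_map_of_mem hgl
  have hnodB : dB.keys.Nodup := by rw [hkeysB]; exact hnodA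
  have hgdB : ∀ c, dB.getD c [] = (S.filter (fun g => g.2.1 == c)).map (fun g => (g.1, g.2.2)) := by
    intro c; rw [hdB, hgroup, hgd0, List.nil_append]
  -- assemble both item lists over the same key list
  rw [hAitems, PySem.Dict.items_eq_map_keys dA hnodA [], PySem.Dict.items_eq_map_keys dB hnodB [],
    hkeysB, List.map_map]
  refine List.map_congr_left (fun c _ => ?_)
  simp only [Function.comp_def]
  rw [hgdA, hgdB, pv_crux]
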